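-- pv_equiv track=rewrite | github.com/GFZ/arosics | components/utilities.py | get_image_tileborders
-- ===== SOURCE A (Python) =====
-- def get_image_tileborders(target_tileSize,shape_fullArr):
--     rows,cols     = shape_fullArr[:2]
--     row_bounds=[0]
--     while row_bounds[-1]+target_tileSize[0] < rows:
--         row_bounds.append(row_bounds[-1] + target_tileSize[0]-1)
--         row_bounds.append(row_bounds[-2] + target_tileSize[0])
--     else:
--         row_bounds.append(rows-1)
--
--     col_bounds=[0]
--     while col_bounds[-1]+target_tileSize[1] < cols:
--         col_bounds.append(col_bounds[-1] + target_tileSize[1]-1)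
--         col_bounds.append(col_bounds[-2] + target_tileSize[1])
--     else:
--         col_bounds.append(cols-1)
--     return [[tuple([row_bounds[r], row_bounds[r+1]]), tuple([col_bounds[c], col_bounds[c+1]])] \
--             for r in range(0, len(row_bounds), 2) for c in range(0, len(col_bounds), 2)]
-- ===== SOURCE B (Python) =====
-- def get_image_tileborders(target_tileSize, shape_fullArr):
--     rows, cols = shape_fullArr[:2]
--
--     def bounds(size, tile):
--         # closed form: ceil(size/tile) tiles of [i*tile, min((i+1)*tile, size)-1]
--         if 0 < tile < size:
--             n = -(-size // tile)
--             return [(i * tile, min((i + 1) * tile, size) - 1) for i in range(n)]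
--         return [(0, size - 1)]
--
--     return [[rb, cb]
--             for rb in bounds(rows, target_tileSize[0])
--             for cb in bounds(cols, target_tileSize[1])]
-- ===== Notes on version B (the rewrite author's own statement) =====
-- stated objective: simpler
-- what changed: B computes each axis's tile intervals by a closed-form ceil-division comprehension ((i*tile, min((i+1)*tile,size)-1) for i in range(ceil(size/tile))) instead of A's stateful while-loop that grows a flat boundary list and regroups it with a stride-2 index pass.
import Mathlib
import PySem

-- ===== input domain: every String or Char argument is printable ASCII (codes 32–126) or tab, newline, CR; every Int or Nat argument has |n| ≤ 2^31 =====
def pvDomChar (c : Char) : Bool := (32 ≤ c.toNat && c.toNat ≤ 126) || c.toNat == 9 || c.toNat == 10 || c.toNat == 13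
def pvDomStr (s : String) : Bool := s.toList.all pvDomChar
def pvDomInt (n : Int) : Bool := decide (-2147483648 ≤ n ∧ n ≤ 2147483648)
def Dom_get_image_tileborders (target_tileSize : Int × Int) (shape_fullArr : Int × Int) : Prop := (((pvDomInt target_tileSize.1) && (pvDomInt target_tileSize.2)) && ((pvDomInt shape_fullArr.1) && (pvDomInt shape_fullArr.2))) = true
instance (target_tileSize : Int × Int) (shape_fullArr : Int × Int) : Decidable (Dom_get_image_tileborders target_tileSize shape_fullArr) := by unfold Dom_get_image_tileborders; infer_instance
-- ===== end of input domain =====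

-- B replaces A's stateful boundary-list while-loop + stride-2 regrouping by a
-- closed-form ceil-division comprehension per axis (objective: simpler).

-- ===== PORT A =====
-- A's while loop; `last` mirrors row_bounds[-1] (always the last appended element),
-- `bs` is the growing boundary list.  The loop does not terminate in Python when
-- tile ≤ 0 < size - tile-ish (excluded by Pre_); fuel (size.toNat + 1) is enough
-- for every terminating run (tile ≥ 1 gives at most size iterations).
def pvAloop (tile size : Int) : Nat → List Int → Int → List Int
  | 0, bs, _ => bs ++ [size - 1]
  | fuel + 1, bs, last =>
    if last + tile < size then
      pvAloop tile size fuel (bs ++ [last + tile - 1, last + tile]) (last + tile)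
    else
      bs ++ [size - 1]

def get_image_tileborders (target_tileSize : Int × Int) (shape_fullArr : Int × Int) : List (List (Int × Int)) :=
  let rows := shape_fullArr.1
  let cols := shape_fullArr.2
  let row_bounds := pvAloop target_tileSize.1 rows (rows.toNat + 1) [0] 0
  let col_bounds := pvAloop target_tileSize.2 cols (cols.toNat + 1) [0] 0
  (PySem.List.pyRange 0 (row_bounds.length : Int) 2).flatMap (fun r =>
    (PySem.List.pyRange 0 (col_bounds.length : Int) 2).map (fun c =>
      [(PySem.List.pyGetD row_bounds r 0, PySem.List.pyGetD row_bounds (r + 1) 0),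
       (PySem.List.pyGetD col_bounds c 0, PySem.List.pyGetD col_bounds (c + 1) 0)]))

-- ===== PORT B =====
-- bounds(size, tile) from Source B: ceil-division closed form.
def pvBounds (size tile : Int) : List (Int × Int) :=
  if 0 < tile ∧ tile < size then
    let n : Int := -(PySem.Int.floordiv (-size) tile)
    (PySem.List.pyRange 0 n 1).map (fun i => (i * tile, min ((i + 1) * tile) size - 1))
  else
    [(0, size - 1)]

def get_image_tileborders_alt (target_tileSize : Int × Int) (shape_fullArr : Int × Int) : List (List (Int × Int)) :=
  let rows := shape_fullArr.1
  let cols := shape_fullArr.2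
  (pvBounds rows target_tileSize.1).flatMap (fun rb =>
    (pvBounds cols target_tileSize.2).map (fun cb => [rb, cb]))

-- ===== PRECONDITION & SPEC =====
-- Pre_ excludes, per axis, tile ≤ 0 with tile < size: there A's while loop never
-- terminates (Python hangs, returning nothing), so nothing is claimed about it.
def Pre_get_image_tileborders (target_tileSize : Int × Int) (shape_fullArr : Int × Int) : Prop :=
  (0 < target_tileSize.1 ∨ shape_fullArr.1 ≤ target_tileSize.1) ∧
  (0 < target_tileSize.2 ∨ shape_fullArr.2 ≤ target_tileSize.2)
instance (target_tileSize : Int × Int) (shape_fullArr : Int × Int) : Decidable (Pre_get_image_tileborders target_tileSize shape_fullArr) := by unfold Pre_get_image_tileborders; infer_instance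

def pvWitness_get_image_tileborders : (Int × Int) × (Int × Int) := ((3, 4), (10, 9))

def Spec_get_image_tileborders (target_tileSize : Int × Int) (shape_fullArr : Int × Int) (out : List (List (Int × Int))) : Prop := out = get_image_tileborders_alt target_tileSize shape_fullArr
instance (target_tileSize : Int × Int) (shape_fullArr : Int × Int) (out : List (List (Int × Int))) : Decidable (Spec_get_image_tileborders target_tileSize shape_fullArr out) := by unfold Spec_get_image_tileborders; infer_instance

-- ===== CLAIM (what is proved, stated in full; the proofs are below) =====
def Claim_equal_get_image_tileborders : Prop := ∀ (target_tileSize : Int × Int) (shape_fullArr : Int × Int), Dom_get_image_tileborders target_tileSize shape_fullArr → Pre_get_image_tileborders target_tileSize shape_fullArr → Spec_get_image_tileborders target_tileSize shape_fullArr (get_image_tileborders target_tileSize shape_fullArr)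

-- ===== LEMMAS AND PROOFS =====

-- group a flat boundary list into consecutive (start, end) pairs
def pvPairsOf : List Int → List (Int × Int)
  | a :: b :: rest => (a, b) :: pvPairsOf rest
  | _ => []

lemma pvAloop_extract (tile size : Int) : ∀ (fuel : Nat) (bs : List Int) (last : Int),
    pvAloop tile size fuel bs last = bs ++ pvAloop tile size fuel [] last := by
  intro fuel
  induction fuel with
  | zero => intro bs last; simp [pvAloop]
  | succ f ih =>
    intro bs last
    simp only [pvAloop]
    split
    · rw [ih (bs ++ _), ih ([] ++ _)]
      simp
    · simp

lemma pvAloop_length_odd (tile size : Int) : ∀ (fuel : Nat) (last : Int),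
    ∃ m : Nat, (pvAloop tile size fuel [] last).length = 2 * m + 1 := by
  intro fuel
  induction fuel with
  | zero => intro last; exact ⟨0, by simp [pvAloop]⟩
  | succ f ih =>
    intro last
    simp only [pvAloop]
    split
    · obtain ⟨m, hm⟩ := ih (last + tile)
      refine ⟨m + 1, ?_⟩
      rw [pvAloop_extract]
      simp [hm]; omega
    · exact ⟨0, by simp⟩

-- ceil characterization of n = -((-s) // tile): (n-1)*tile < s ≤ n*tile
lemma pvCeil (s tile : Int) (ht : 0 < tile) :
    (-(PySem.Int.floordiv (-s) tile) - 1) * tile < s ∧ s ≤ -(PySem.Int.floordiv (-s) tile) * tile := by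
  have h1 := Int.lt_fdiv_add_one_mul_self (-s) ht
  have h2 := Int.mul_fdiv_self_le (x := -s) ht
  simp only [PySem.Int.floordiv]
  constructor
  · nlinarith
  · nlinarith

lemma pvCeil_uniq {s t a b : Int} (ht : 0 < t) (ha1 : (a - 1) * t < s) (ha2 : s ≤ a * t)
    (hb1 : (b - 1) * t < s) (hb2 : s ≤ b * t) : a = b := by
  by_contra h
  rcases lt_or_gt_of_ne h with hlt | hlt
  · have : a ≤ b - 1 := by omega
    nlinarith
  · have : b ≤ a - 1 := by omega
    nlinarith

-- "peel one tile" unfolding of the closed form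
lemma pvBounds_peel (size tile : Int) (ht : 0 < tile) (hs : tile < size) :
    pvBounds size tile
      = (0, tile - 1) :: (pvBounds (size - tile) tile).map (fun p => (p.1 + tile, p.2 + tile)) := by
  obtain ⟨hn1, hn2⟩ := pvCeil size tile ht
  set n : Int := -(PySem.Int.floordiv (-size) tile) with hn
  have hge2 : 2 ≤ n := by nlinarith
  rw [pvBounds, if_pos ⟨ht, hs⟩]
  simp only [← hn]
  by_cases hrec : tile < size - tile
  · obtain ⟨hm1, hm2⟩ := pvCeil (size - tile) tile ht
    set n' : Int := -(PySem.Int.floordiv (-(size - tile)) tile) with hn'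
    have hnn' : n' = n - 1 :=
      pvCeil_uniq ht hm1 hm2 (by nlinarith) (by nlinarith)
    rw [pvBounds, if_pos ⟨ht, hrec⟩]
    simp only [← hn', hnn']
    rw [PySem.List.pyRange_one, PySem.List.pyRange_one]
    have hnt : (n - 0).toNat = ((n - 1 - 0).toNat) + 1 := by omega
    rw [hnt, List.range_succ_eq_map]
    simp only [List.map_cons, List.map_map, List.cons.injEq]
    constructor
    · have hmin : min ((0 + (0 : Int) + 1) * tile) size = tile := by
        rw [min_eq_left (by nlinarith)]
        ring
      simp only [Nat.cast_zero, hmin]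
      norm_num
    · apply List.map_congr_left
      intro k _
      simp only [Function.comp, Nat.succ_eq_add_one, Prod.mk.injEq]
      have hkey : min ((0 + ((k : Int) + 1) + 1) * tile) size
          = min ((0 + (k : Int) + 1) * tile) (size - tile) + tile := by
        rw [show (0 + ((k : Int) + 1) + 1) * tile = (0 + (k : Int) + 1) * tile + tile from by ring]
        conv_lhs => rw [show size = (size - tile) + tile from by ring]
        rw [min_add_add_right]
      constructor
      · push_cast; ring
      · push_cast
        omega
  · have hn2' : n = 2 := by
      have hle : size - tile ≤ tile := le_of_not_gt hrec
      have := pvCeil_uniq (s := size) (t := tile) (a := n) (b := 2) ht hn1 hn2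
        (by nlinarith) (by nlinarith)
      exact this
    rw [hn2']
    rw [pvBounds, if_neg (by rintro ⟨_, h⟩; omega)]
    rw [show PySem.List.pyRange 0 2 1 = [0, 1] from by decide]
    have hA : ((0 : Int) * tile, min ((0 + 1) * tile) size - 1) = ((0 : Int), tile - 1) := by
      rw [show ((0 : Int) + 1) * tile = tile from by ring, min_eq_left (le_of_lt hs)]
      norm_num
    have hB : ((1 : Int) * tile, min ((1 + 1) * tile) size - 1)
        = ((0 : Int) + tile, size - tile - 1 + tile) := by
      rw [show ((1 : Int) + 1) * tile = 2 * tile from by ring,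
        min_eq_right (by omega : size ≤ 2 * tile)]
      simp only [Prod.mk.injEq]
      exact ⟨by ring, by omega⟩
    simp only [List.map_cons, List.map_nil, hA, hB]

-- the pairs of A's boundary list from `last` are B's intervals shifted by `last`
lemma pvAloop_pairs (tile size : Int) (ht : 0 < tile) : ∀ (fuel : Nat) (last : Int),
    (size - last).toNat ≤ fuel →
    pvPairsOf (last :: pvAloop tile size fuel [] last)
      = (pvBounds (size - last) tile).map (fun p => (p.1 + last, p.2 + last)) := by
  intro fuel
  induction fuel with
  | zero =>
    intro last hf
    have hsl : size ≤ last := by omega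
    rw [pvBounds, if_neg (by rintro ⟨_, h⟩; omega)]
    simp [pvAloop, pvPairsOf]
    omega
  | succ f ih =>
    intro last hf
    simp only [pvAloop]
    split
    · rename_i hcond
      rw [pvAloop_extract]
      have hstep : pvPairsOf (last :: (last + tile - 1) :: (last + tile) :: pvAloop tile size f [] (last + tile))
          = (last, last + tile - 1) :: pvPairsOf ((last + tile) :: pvAloop tile size f [] (last + tile)) := rfl
      simp only [List.cons_append, List.nil_append]
      rw [hstep, ih (last + tile) (by omega)]
      rw [pvBounds_peel (size - last) tile ht (by omega)]
      rw [show size - (last + tile) = size - last - tile from by ring]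
      simp only [List.map_cons, List.map_map, List.cons.injEq, Prod.mk.injEq]
      refine ⟨⟨by ring, by ring⟩, ?_⟩
      apply List.map_congr_left
      intro p _
      simp only [Function.comp, Prod.mk.injEq]
      constructor <;> ring
    · rename_i hcond
      rw [pvBounds, if_neg (by rintro ⟨_, h⟩; omega)]
      simp [pvPairsOf]
      omega

-- per-axis result: A's grouped boundary list is exactly B's bounds list
lemma pvAxis (size tile : Int) (h : 0 < tile ∨ size ≤ tile) :
    pvPairsOf (pvAloop tile size (size.toNat + 1) [0] 0) = pvBounds size tile := by
  by_cases ht : 0 < tile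
  · rw [pvAloop_extract]
    have := pvAloop_pairs tile size ht (size.toNat + 1) 0 (by omega)
    simp only [List.singleton_append] at this ⊢
    rw [this]
    simp
  · have hst : size ≤ tile := h.resolve_left ht
    rw [show size.toNat + 1 = Nat.succ size.toNat from rfl]
    simp only [pvAloop]
    rw [if_neg (by omega)]
    rw [pvBounds, if_neg (by rintro ⟨_, h'⟩; omega)]
    simp [pvPairsOf]

-- the stride-2 index comprehension over an even-length list is a map over its pairs
lemma pvGetDpairs {β : Type} (g : Int × Int → β) : ∀ (m : Nat) (bs : List Int), bs.length = 2 * m →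
    (List.range m).map (fun k => g (bs.getD (2 * k) 0, bs.getD (2 * k + 1) 0))
      = (pvPairsOf bs).map g := by
  intro m
  induction m with
  | zero =>
    intro bs hbs
    rw [List.length_eq_zero_iff.mp hbs]
    simp [pvPairsOf]
  | succ m ih =>
    intro bs hbs
    match bs, hbs with
    | a :: b :: rest, hbs =>
      have hrest : rest.length = 2 * m := by simp at hbs; omega
      rw [List.range_succ_eq_map]
      simp only [List.map_cons, List.map_map, pvPairsOf, List.cons.injEq]
      refine ⟨by simp, ?_⟩
      rw [← ih rest hrest]
      apply List.map_congr_left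
      intro k _
      simp only [Function.comp, Nat.succ_eq_add_one]
      have h1 : 2 * (k + 1) = (2 * k + 1) + 1 := by omega
      rw [h1]
      simp

lemma pvRange2 (m : Nat) :
    PySem.List.pyRange 0 ((2 * m : Nat) : Int) 2 = (List.range m).map (fun k => ((2 * k : Nat) : Int)) := by
  rw [PySem.List.pyRange_of_pos 0 ((2 * m : Nat) : Int) (by norm_num)]
  have hcount : (if (0 : Int) < ((2 * m : Nat) : Int) then ((((2 * m : Nat) : Int) - 0 + 2 - 1) / 2).toNat else 0) = m := by
    by_cases hm : 0 < m
    · rw [if_pos (by push_cast; omega)]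
      have : (((2 * m : Nat) : Int) - 0 + 2 - 1) = 1 + (m : Int) * 2 := by push_cast; ring
      rw [this, Int.add_mul_ediv_right 1 (m : Int) (by norm_num)]
      simp
    · have : m = 0 := by omega
      simp [this]
  rw [hcount]
  apply List.map_congr_left
  intro k _
  push_cast
  ring

-- A's [ … for r in range(0, len(bs), 2) ] comprehension, rewritten over pairs
lemma pvRangeGetD {β : Type} (g : Int × Int → β) (m : Nat) (bs : List Int) (hbs : bs.length = 2 * m) :
    (PySem.List.pyRange 0 (bs.length : Int) 2).map
        (fun r => g (PySem.List.pyGetD bs r 0, PySem.List.pyGetD bs (r + 1) 0))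
      = (pvPairsOf bs).map g := by
  rw [hbs, pvRange2 m, List.map_map]
  rw [← pvGetDpairs g m bs hbs]
  apply List.map_congr_left
  intro k _
  simp only [Function.comp]
  rw [PySem.List.pyGetD_natCast]
  rw [show ((2 * k : Nat) : Int) + 1 = ((2 * k + 1 : Nat) : Int) from by push_cast; ring]
  rw [PySem.List.pyGetD_natCast]

-- ===== VERDICT (by name: the statement is the Claim_ definition above) =====
theorem get_image_tileborders_spec : Claim_equal_get_image_tileborders := by
  intro ts shape hdom hpre
  obtain ⟨h1, h2⟩ := hpre
  unfold Spec_get_image_tileborders get_image_tileborders get_image_tileborders_alt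
  simp only []
  set rb := pvAloop ts.1 shape.1 (shape.1.toNat + 1) [0] 0 with hrb
  set cb := pvAloop ts.2 shape.2 (shape.2.toNat + 1) [0] 0 with hcb
  -- even lengths
  obtain ⟨mr, hmr⟩ := pvAloop_length_odd ts.1 shape.1 (shape.1.toNat + 1) 0
  obtain ⟨mc, hmc⟩ := pvAloop_length_odd ts.2 shape.2 (shape.2.toNat + 1) 0
  have hrblen : rb.length = 2 * (mr + 1) := by
    rw [hrb, pvAloop_extract]
    simp [hmr]; omega
  have hcblen : cb.length = 2 * (mc + 1) := by
    rw [hcb, pvAloop_extract]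
    simp [hmc]; omega
  have hinner : ∀ r : Int,
      (PySem.List.pyRange 0 (cb.length : Int) 2).map (fun c =>
        [(PySem.List.pyGetD rb r 0, PySem.List.pyGetD rb (r + 1) 0),
         (PySem.List.pyGetD cb c 0, PySem.List.pyGetD cb (c + 1) 0)])
      = (pvPairsOf cb).map (fun q =>
          [(PySem.List.pyGetD rb r 0, PySem.List.pyGetD rb (r + 1) 0), q]) := by
    intro r
    exact pvRangeGetD
      (fun q => [(PySem.List.pyGetD rb r 0, PySem.List.pyGetD rb (r + 1) 0), q]) (mc + 1) cb hcblen
  rw [funext hinner]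
  have houter : (PySem.List.pyRange 0 (rb.length : Int) 2).map
      (fun r => (PySem.List.pyGetD rb r 0, PySem.List.pyGetD rb (r + 1) 0)) = pvPairsOf rb := by
    have := pvRangeGetD (g := id) (mr + 1) rb hrblen
    simpa using this
  rw [← List.flatMap_map
    (fun r => (PySem.List.pyGetD rb r 0, PySem.List.pyGetD rb (r + 1) 0))
    (fun p => (pvPairsOf cb).map (fun q => [p, q]))]
  rw [houter, hrb, hcb, pvAxis shape.1 ts.1 h1, pvAxis shape.2 ts.2 h2]
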